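-- pv_equiv track=rewrite | github.com/Silverret/scipopt_project | DM2/Linear_Programming_Museum.1.py | create_position_set
-- ===== SOURCE A (Python) =====
-- def create_position_set(locations, small_radius, big_radius, width, height):
--     """
--     Create a square mesh of variables.
--     The mesh size is 1 (ie there is a variable for every integer coordinates)
--
--     We don't create the variables too far from the nearest location to lighten the model.
--     """
--     position_set = set()
--     for loc_x, loc_y in locations:
--         for i in range(max(0, loc_x-small_radius), min(height, loc_x+1+small_radius)):
--             for j in range(max(0, loc_y-small_radius), min(width, loc_y+1+small_radius)):
--                 if (1, i, j) in position_set: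
--                     continue
--                 if (i-loc_x)**2 + (j-loc_y)**2 <= (small_radius**2):
--                     position_set.add((1, i, j))
--
--         for i in range(max(0, loc_x-big_radius), min(height, loc_x+1+big_radius)):
--             for j in range(max(0, loc_y-big_radius), min(width, loc_y+1+big_radius)):
--                 if (2, i, j) in position_set:
--                     continue
--                 if (i-loc_x)**2 + (j-loc_y)**2 <= (big_radius**2):
--                     position_set.add((2, i, j))
--
--     return position_set
-- ===== SOURCE B (Python) =====
-- def _isqrt(n):
--     if n < 1:
--         return 0
--     x = n
--     y = (x + n // x) // 2
--     while y < x: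
--         x = y
--         y = (x + n // x) // 2
--     return x
--
--
-- def create_position_set(locations, small_radius, big_radius, width, height):
--     position_set = set()
--     for loc_x, loc_y in locations:
--         for tag, radius in ((1, small_radius), (2, big_radius)):
--             for i in range(max(0, loc_x - radius), min(height, loc_x + 1 + radius)):
--                 half = _isqrt(radius * radius - (i - loc_x) ** 2)
--                 for j in range(max(0, loc_y - half), min(width, loc_y + 1 + half)):
--                     position_set.add((tag, i, j))
--     return position_set
-- ===== Notes on version B (the rewrite author's own statement) =====
-- stated objective: alternative
-- what changed: Instead of scanning each location's clamped bounding box and testing every cell against the circle equation (with a redundant membership guard), B computes for each row the exact column interval of the disk via an integer square root and inserts that contiguous run directly, folding the duplicated small/big blocks into one loop over (tag, radius) pairs.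
import Mathlib
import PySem

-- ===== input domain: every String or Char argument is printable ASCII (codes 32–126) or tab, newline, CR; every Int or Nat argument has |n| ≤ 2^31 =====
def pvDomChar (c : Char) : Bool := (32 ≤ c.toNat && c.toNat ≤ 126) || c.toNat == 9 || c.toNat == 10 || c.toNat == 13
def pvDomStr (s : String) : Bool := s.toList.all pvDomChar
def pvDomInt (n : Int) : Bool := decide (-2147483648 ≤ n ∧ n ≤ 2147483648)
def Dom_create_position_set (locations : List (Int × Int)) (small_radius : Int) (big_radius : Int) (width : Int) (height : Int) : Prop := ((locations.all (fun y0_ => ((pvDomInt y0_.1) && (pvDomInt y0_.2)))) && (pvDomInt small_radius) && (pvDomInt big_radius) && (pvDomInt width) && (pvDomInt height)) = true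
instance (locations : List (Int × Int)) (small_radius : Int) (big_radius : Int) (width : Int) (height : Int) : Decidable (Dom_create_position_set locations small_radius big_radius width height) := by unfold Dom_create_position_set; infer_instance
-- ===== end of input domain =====

-- B computes each disk row's column interval with an integer square root and inserts it directly,
-- folding the duplicated small/big blocks into one (tag, radius) loop, instead of A's per-cell
-- circle test with a membership guard over each clamped bounding box (alternative decomposition).


-- ===== PORT A =====
def create_position_set (locations : List (Int × Int)) (small_radius : Int) (big_radius : Int) (width : Int) (height : Int) : List (Int × Int × Int) :=
  locations.foldl (fun ps loc =>
    let ps :=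
      (PySem.List.pyRange (max 0 (loc.1 - small_radius)) (min height (loc.1 + 1 + small_radius)) 1).foldl (fun ps i =>
        (PySem.List.pyRange (max 0 (loc.2 - small_radius)) (min width (loc.2 + 1 + small_radius)) 1).foldl (fun ps j =>
          if PySem.Set.contains ps (1, i, j) then ps
          else if (i - loc.1) ^ 2 + (j - loc.2) ^ 2 ≤ small_radius ^ 2 then PySem.Set.add ps (1, i, j)
          else ps) ps) ps
    (PySem.List.pyRange (max 0 (loc.1 - big_radius)) (min height (loc.1 + 1 + big_radius)) 1).foldl (fun ps i =>
      (PySem.List.pyRange (max 0 (loc.2 - big_radius)) (min width (loc.2 + 1 + big_radius)) 1).foldl (fun ps j =>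
        if PySem.Set.contains ps (2, i, j) then ps
        else if (i - loc.1) ^ 2 + (j - loc.2) ^ 2 ≤ big_radius ^ 2 then PySem.Set.add ps (2, i, j)
        else ps) ps) ps) PySem.Set.empty

-- ===== PORT B =====
-- B: one line at a time; half-width of the disk row from a hand-rolled linear integer sqrt (Source B's _isqrt)
def pvIsqrtGo (n x : Nat) : Nat :=
  let y := (x + n / x) / 2
  if y < x then pvIsqrtGo n y else x
termination_by x

def pvIsqrt (n : Int) : Int := if n < 1 then 0 else (pvIsqrtGo n.toNat n.toNat : Nat)

def create_position_set_alt (locations : List (Int × Int)) (small_radius : Int) (big_radius : Int) (width : Int) (height : Int) : List (Int × Int × Int) :=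
  locations.foldl (fun ps loc =>
    [((1 : Int), small_radius), ((2 : Int), big_radius)].foldl (fun ps tr =>
      (PySem.List.pyRange (max 0 (loc.1 - tr.2)) (min height (loc.1 + 1 + tr.2)) 1).foldl (fun ps i =>
        let half := pvIsqrt (tr.2 * tr.2 - (i - loc.1) ^ 2)
        (PySem.List.pyRange (max 0 (loc.2 - half)) (min width (loc.2 + 1 + half)) 1).foldl (fun ps j =>
          PySem.Set.add ps (tr.1, i, j)) ps) ps) ps) PySem.Set.empty

-- ===== PRECONDITION & SPEC =====
def Spec_create_position_set (locations : List (Int × Int)) (small_radius : Int) (big_radius : Int) (width : Int) (height : Int) (out : List (Int × Int × Int)) : Prop := out = create_position_set_alt locations small_radius big_radius width height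
instance (locations : List (Int × Int)) (small_radius : Int) (big_radius : Int) (width : Int) (height : Int) (out : List (Int × Int × Int)) : Decidable (Spec_create_position_set locations small_radius big_radius width height out) := by unfold Spec_create_position_set; infer_instance

-- ===== CLAIM (what is proved, stated in full; the proofs are below) =====
def Claim_equal_create_position_set : Prop := ∀ (locations : List (Int × Int)) (small_radius : Int) (big_radius : Int) (width : Int) (height : Int), Dom_create_position_set locations small_radius big_radius width height → Spec_create_position_set locations small_radius big_radius width height (create_position_set locations small_radius big_radius width height)


-- ===== LEMMAS AND PROOFS =====

-- Newton step stays at or above the integer square root (AM-GM on naturals)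
theorem pvNewton_ge_sqrt (n x : Nat) (hx : 1 ≤ x) : Nat.sqrt n ≤ (x + n / x) / 2 := by
  set s := Nat.sqrt n with hs
  rcases Nat.le_total (2 * s) x with hle | hlt
  · have : x ≤ x + n / x := Nat.le_add_right _ _
    omega
  · have h1 : (2 * s - x) * x ≤ n := by
      have hsn : s * s ≤ n := by
        have := Nat.sqrt_le' n
        simpa [pow_two] using this
      have hsq : (2 * s - x) * x ≤ s * s := by
        zify [hlt]
        nlinarith [sq_nonneg ((s : Int) - x)]
      omega
    have h2 : 2 * s - x ≤ n / x := (Nat.le_div_iff_mul_le (by omega)).2 h1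
    have h3 : 2 * s ≤ x + n / x := by omega
    exact (Nat.le_div_iff_mul_le (by omega : 0 < 2)).2 (by omega)

theorem pvIsqrtGo_spec (n x : Nat) (hn : 1 ≤ n) (hx : 1 ≤ x) (hxs : Nat.sqrt n ≤ x) :
    pvIsqrtGo n x * pvIsqrtGo n x ≤ n ∧ n < (pvIsqrtGo n x + 1) * (pvIsqrtGo n x + 1) := by
  fun_induction pvIsqrtGo n x with
  | case1 x y hlt ih =>
    have hsy : Nat.sqrt n ≤ y := pvNewton_ge_sqrt n x hx
    have hs1 : 0 < Nat.sqrt n := Nat.sqrt_pos.2 (by omega)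
    exact ih (by omega) hsy
  | case2 x y hge =>
    have hxy : x ≤ (x + n / x) / 2 := by omega
    have h1 : x ≤ n / x := by omega
    have h2 : x * x ≤ n := (Nat.le_div_iff_mul_le (by omega)).1 h1
    have h3 : n < (Nat.sqrt n + 1) * (Nat.sqrt n + 1) := by
      have := Nat.lt_succ_sqrt' n
      simpa [pow_two, Nat.succ_eq_add_one] using this
    exact ⟨h2, by nlinarith⟩

theorem pvIsqrt_spec (n : Int) (h : 0 ≤ n) :
    0 ≤ pvIsqrt n ∧ pvIsqrt n * pvIsqrt n ≤ n ∧ n < (pvIsqrt n + 1) * (pvIsqrt n + 1) := by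
  unfold pvIsqrt
  split_ifs with h1
  · refine ⟨le_refl 0, by omega, by omega⟩
  · have hn : 1 ≤ n.toNat := by omega
    have hspec := pvIsqrtGo_spec n.toNat n.toNat hn (by omega) (Nat.sqrt_le_self _)
    refine ⟨by positivity, ?_, ?_⟩
    · have := hspec.1
      zify at this
      omega
    · have := hspec.2
      zify at this
      omega

-- strictly increasing integer lists with the same members are equal
theorem eq_of_mem_iff_pairwise_lt {l1 l2 : List Int}
    (p1 : l1.Pairwise (· < ·)) (p2 : l2.Pairwise (· < ·))
    (hm : ∀ x, x ∈ l1 ↔ x ∈ l2) : l1 = l2 := by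
  have n1 : l1.Nodup := p1.imp (fun h => ne_of_lt h)
  have n2 : l2.Nodup := p2.imp (fun h => ne_of_lt h)
  have hp : l1.Perm l2 := (List.perm_ext_iff_of_nodup n1 n2).2 hm
  exact hp.eq_of_pairwise (fun a b _ _ h1 h2 => absurd h2 (asymm h1)) p1 p2

theorem filter_pyRange_interval (a b c d : Int) :
    (PySem.List.pyRange a b 1).filter (fun j => decide (c ≤ j ∧ j ≤ d))
      = PySem.List.pyRange (max a c) (min b (d + 1)) 1 := by
  apply eq_of_mem_iff_pairwise_lt
  · exact List.Pairwise.sublist (List.filter_sublist) (PySem.List.pairwise_lt_pyRange_one a b)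
  · exact PySem.List.pairwise_lt_pyRange_one _ _
  · intro x
    simp [List.mem_filter, PySem.List.mem_pyRange_one]
    omega



theorem row_eq (t r lx ly w i : Int) (hr : 0 ≤ r) (h1 : lx - r ≤ i) (h2 : i ≤ lx + r)
    (ps : List (Int × Int × Int)) :
    (PySem.List.pyRange (max 0 (ly - r)) (min w (ly + 1 + r)) 1).foldl
      (fun ps j => if (i - lx) ^ 2 + (j - ly) ^ 2 ≤ r ^ 2 then PySem.Set.add ps (t, i, j) else ps) ps
  = (PySem.List.pyRange (max 0 (ly - pvIsqrt (r * r - (i - lx) ^ 2)))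
      (min w (ly + 1 + pvIsqrt (r * r - (i - lx) ^ 2))) 1).foldl
      (fun ps j => PySem.Set.add ps (t, i, j)) ps := by
  set half := pvIsqrt (r * r - (i - lx) ^ 2) with hhalf
  have hn : 0 ≤ r * r - (i - lx) ^ 2 := by nlinarith
  obtain ⟨hh0, hh1, hh2⟩ := pvIsqrt_spec _ hn
  rw [← hhalf] at hh0 hh1 hh2
  have hhr : half ≤ r := by nlinarith
  have hpred : ∀ j : Int, ((i - lx) ^ 2 + (j - ly) ^ 2 ≤ r ^ 2) ↔ (ly - half ≤ j ∧ j ≤ ly + half) := by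
    intro j
    constructor
    · intro hj
      have hlt : (j - ly) ^ 2 < (half + 1) * (half + 1) := by nlinarith
      constructor <;> nlinarith
    · rintro ⟨ha, hb⟩
      nlinarith
  rw [PySem.List.foldl_ite_eq_foldl_filter]
  have hfe : (PySem.List.pyRange (max 0 (ly - r)) (min w (ly + 1 + r)) 1).filter
        (fun j => decide ((i - lx) ^ 2 + (j - ly) ^ 2 ≤ r ^ 2))
      = (PySem.List.pyRange (max 0 (ly - r)) (min w (ly + 1 + r)) 1).filter
        (fun j => decide (ly - half ≤ j ∧ j ≤ ly + half)) := by
    apply List.filter_congr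
    intro j _
    exact decide_eq_decide.mpr (hpred j)
  rw [hfe, filter_pyRange_interval]
  have e1 : max (max 0 (ly - r)) (ly - half) = max 0 (ly - half) := by omega
  have e2 : min (min w (ly + 1 + r)) (ly + half + 1) = min w (ly + 1 + half) := by omega
  rw [e1, e2]

theorem block_eq (t r lx ly w h : Int) (ps : List (Int × Int × Int)) :
    (PySem.List.pyRange (max 0 (lx - r)) (min h (lx + 1 + r)) 1).foldl (fun ps i =>
      (PySem.List.pyRange (max 0 (ly - r)) (min w (ly + 1 + r)) 1).foldl (fun ps j =>
        if PySem.Set.contains ps (t, i, j) then ps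
        else if (i - lx) ^ 2 + (j - ly) ^ 2 ≤ r ^ 2 then PySem.Set.add ps (t, i, j)
        else ps) ps) ps
  = (PySem.List.pyRange (max 0 (lx - r)) (min h (lx + 1 + r)) 1).foldl (fun ps i =>
      let half := pvIsqrt (r * r - (i - lx) ^ 2)
      (PySem.List.pyRange (max 0 (ly - half)) (min w (ly + 1 + half)) 1).foldl (fun ps j =>
        PySem.Set.add ps (t, i, j)) ps) ps := by
  apply PySem.List.foldl_congr_mem
  intro ps i hi
  rw [PySem.List.mem_pyRange_one] at hi
  have hr : 0 ≤ r := by omega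
  have h1 : lx - r ≤ i := by omega
  have h2 : i ≤ lx + r := by omega
  have hstep : (fun (ps : List (Int × Int × Int)) (j : Int) =>
      if PySem.Set.contains ps (t, i, j) then ps
      else if (i - lx) ^ 2 + (j - ly) ^ 2 ≤ r ^ 2 then PySem.Set.add ps (t, i, j) else ps)
    = (fun ps j => if (i - lx) ^ 2 + (j - ly) ^ 2 ≤ r ^ 2 then PySem.Set.add ps (t, i, j) else ps) := by
    funext ps j
    by_cases hc : PySem.Set.contains ps (t, i, j)
    · simp [PySem.Set.add]
      exact fun a _ => a
    · simp only [PySem.Set.contains] at hc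
      simp
      intro hm
      simp [hm] at hc
  rw [hstep]
  exact row_eq t r lx ly w i hr h1 h2 ps

-- ===== VERDICT (by name: the statement is the Claim_ definition above) =====
theorem create_position_set_spec : Claim_equal_create_position_set := by
  intro locations sr br w h _
  unfold Spec_create_position_set create_position_set create_position_set_alt
  apply PySem.List.foldl_congr_mem
  intro ps loc _
  simp only [List.foldl]
  rw [block_eq 1 sr loc.1 loc.2 w h ps]
  rw [block_eq 2 br loc.1 loc.2 w h _]
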